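-- pv_equiv track=rewrite | github.com/carnival77/Algorithm_Practice | Programmers/Level1/Kakao/구현/레벨1.신고 결과 받기.py | solution
-- ===== SOURCE A (Python) =====
-- from collections import defaultdict
--
-- def solution(id_list, report, k):
--     answer=[0]*len(id_list)
--     user = defaultdict(set)# user별 신고한 id 저장
--     cnt=defaultdict(int)# user별 신고당한 횟수 저장
--
--     for r in set(report): # 중복 신고 제거
--         a,b=r.split()
--         user[a].add(b)# 신고자가 신고한 id 추가
--         cnt[b]+=1# 신고당한 id의 신고 횟수 추가
--
--     for inx,id in enumerate(id_list):
--         # user가 신고한 id가 k번 이상 신고 당했으면, 받을 메일 추가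
--         for u in user[id]:
--             if cnt[u]>=k:
--                 answer[inx]+=1
--
--     return answer
-- ===== SOURCE B (Python) =====
-- from collections import Counter
--
-- def solution(id_list, report, k):
--     uniq = set(report)                       # distinct raw report strings, like the original
--     cnt = Counter(r.split()[1] for r in uniq)        # times each user was reported
--     banned = {b for b in cnt if cnt[b] >= k}         # banned users, computed once
--     score = Counter()                                # mails per reporter name
--     for a, b in {tuple(r.split()) for r in uniq}:    # distinct (reporter, target) pairs
--         if b in banned:
--             score[a] += 1
--     return [score[uid] for uid in id_list]
-- ===== Notes on version B (the rewrite author's own statement) =====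
-- stated objective: alternative
-- what changed: B precomputes the banned set once and replaces A's enumerate-indexed answer array with nested per-user iteration over a dict of reported-sets by a single pass over the deduplicated (reporter, target) pairs that accumulates a mail Counter keyed by reporter name, read off per id at the end.
import Mathlib
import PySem

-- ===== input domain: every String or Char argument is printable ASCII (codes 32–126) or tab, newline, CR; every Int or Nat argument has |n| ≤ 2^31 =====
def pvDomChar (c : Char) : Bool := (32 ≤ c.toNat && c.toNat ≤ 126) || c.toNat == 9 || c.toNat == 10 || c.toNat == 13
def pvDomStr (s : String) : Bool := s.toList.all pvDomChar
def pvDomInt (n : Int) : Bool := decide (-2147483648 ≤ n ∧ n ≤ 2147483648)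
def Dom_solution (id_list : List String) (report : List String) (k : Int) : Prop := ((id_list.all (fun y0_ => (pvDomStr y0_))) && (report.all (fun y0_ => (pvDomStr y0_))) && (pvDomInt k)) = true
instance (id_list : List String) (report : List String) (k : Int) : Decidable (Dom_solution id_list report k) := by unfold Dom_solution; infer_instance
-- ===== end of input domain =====

-- B precomputes the banned set and tallies mails per reporter NAME in one pass over the
-- distinct (reporter, target) pairs, instead of A's per-index nested loop over a dict of sets.

-- ===== PORT A =====
-- 'a, b = r.split()': the wildcard arm is where Python raises ValueError (excluded by Pre_)
def solA_user (d : PySem.Dict String (PySem.Set String)) (r : String) :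
    PySem.Dict String (PySem.Set String) :=
  match PySem.Str.split₀ r with
  | [a, b] => d.modify a PySem.Set.empty (fun s => PySem.Set.add s b)
  | _ => d

def solA_cnt (d : PySem.Dict String Int) (r : String) : PySem.Dict String Int :=
  match PySem.Str.split₀ r with
  | [_, b] => d.modify b 0 (· + 1)
  | _ => d

def solution (id_list : List String) (report : List String) (k : Int) : List Int :=
  let answer := List.replicate id_list.length (0 : Int)
  -- for r in set(report): user[a].add(b); cnt[b] += 1
  let st := (PySem.Set.ofList report).foldl
    (fun (st : PySem.Dict String (PySem.Set String) × PySem.Dict String Int) r =>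
      (solA_user st.1 r, solA_cnt st.2 r))
    (PySem.Dict.empty, PySem.Dict.empty)
  -- for inx, id in enumerate(id_list): for u in user[id]: if cnt[u] >= k: answer[inx] += 1
  (PySem.List.enumerate id_list 0).foldl
    (fun ans p =>
      (st.1.getD p.2 PySem.Set.empty).foldl
        (fun ans u =>
          if k ≤ st.2.getD u 0 then
            PySem.List.pySetD ans p.1 (PySem.List.pyGetD ans p.1 0 + 1)
          else ans)
        ans)
    answer

-- ===== PORT B =====
def solution_alt (id_list : List String) (report : List String) (k : Int) : List Int :=
  let uniq := PySem.Set.ofList report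
  let cnt := PySem.Dict.counter
    (uniq.map (fun r => PySem.List.pyGetD (PySem.Str.split₀ r) 1 ""))
  let banned := PySem.Set.ofList (cnt.keys.filter (fun b => k ≤ cnt.getD b 0))
  let pairs : PySem.Set (String × String) := PySem.Set.ofList (uniq.map (fun r =>
    (PySem.List.pyGetD (PySem.Str.split₀ r) 0 "", PySem.List.pyGetD (PySem.Str.split₀ r) 1 "")))
  let score := pairs.foldl
    (fun (d : PySem.Dict String Int) p =>
      if PySem.Set.contains banned p.2 then d.modify p.1 0 (· + 1) else d)
    PySem.Dict.empty
  id_list.map (fun uid => score.getD uid 0)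

-- ===== PRECONDITION & SPEC =====
-- Pre_ excludes exactly the inputs where A raises: a report string that does not split
-- into exactly two whitespace-separated tokens (ValueError in 'a, b = r.split()').
def Pre_solution (id_list : List String) (report : List String) (k : Int) : Prop :=
  ∀ r ∈ report, (PySem.Str.split₀ r).length = 2
instance (id_list : List String) (report : List String) (k : Int) : Decidable (Pre_solution id_list report k) := by unfold Pre_solution; infer_instance

def pvWitness_solution : List String × List String × Int :=
  (["alice", "bob"], ["alice bob", "bob alice"], 1)

def Spec_solution (id_list : List String) (report : List String) (k : Int) (out : List Int) : Prop := out = solution_alt id_list report k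
instance (id_list : List String) (report : List String) (k : Int) (out : List Int) : Decidable (Spec_solution id_list report k out) := by unfold Spec_solution; infer_instance

-- ===== CLAIM (what is proved, stated in full; the proofs are below) =====
def Claim_equal_solution : Prop := ∀ (id_list : List String) (report : List String) (k : Int), Dom_solution id_list report k → Pre_solution id_list report k → Spec_solution id_list report k (solution id_list report k)

-- ===== LEMMAS AND PROOFS =====

-- tokens of a report line, as B reads them
def pvT0 (r : String) : String := PySem.List.pyGetD (PySem.Str.split₀ r) 0 ""
def pvT1 (r : String) : String := PySem.List.pyGetD (PySem.Str.split₀ r) 1 ""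

lemma pv_tok (r : String) (h : (PySem.Str.split₀ r).length = 2) :
    PySem.Str.split₀ r = [pvT0 r, pvT1 r] := by
  unfold pvT0 pvT1
  match hs : PySem.Str.split₀ r with
  | [a, b] => simp [PySem.List.pyGetD]
  | [] => rw [hs] at h; simp at h
  | [a] => rw [hs] at h; simp at h
  | a :: b :: c :: t => rw [hs] at h; simp at h

lemma pv_set_mid (pre : List Int) (r v : Int) (rest : List Int) :
    (pre ++ r :: rest).set pre.length v = pre ++ v :: rest := by
  induction pre with
  | nil => rfl
  | cons x xs ih => simp [ih]

lemma pv_getD_mid (pre : List Int) (r : Int) (rest : List Int) :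
    (pre ++ r :: rest).getD pre.length 0 = r := by
  induction pre with
  | nil => rfl
  | cons x xs ih => simpa using ih

-- the inner loop 'for u in user[id]: if cnt[u] >= k: answer[inx] += 1'
lemma pv_inner (P : String → Prop) [DecidablePred P] (s : List String) :
    ∀ (pre : List Int) (r : Int) (rest : List Int),
    s.foldl (fun ans u => if P u then
        PySem.List.pySetD ans (pre.length : Int) (PySem.List.pyGetD ans (pre.length : Int) 0 + 1)
      else ans) (pre ++ r :: rest)
    = pre ++ (r + (s.countP (fun u => decide (P u)) : Int)) :: rest := by
  induction s with
  | nil => intro pre r rest; simp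
  | cons u s ih =>
    intro pre r rest
    simp only [List.foldl_cons, List.countP_cons]
    by_cases hP : P u
    · have hacc : (if P u then
          PySem.List.pySetD (pre ++ r :: rest) ((pre.length : Nat) : Int)
            (PySem.List.pyGetD (pre ++ r :: rest) ((pre.length : Nat) : Int) 0 + 1)
        else (pre ++ r :: rest)) = pre ++ (r + 1) :: rest := by
        rw [if_pos hP]
        simp only [PySem.List.pySetD_natCast, PySem.List.pyGetD_natCast,
          pv_getD_mid, pv_set_mid]
      rw [hacc, ih pre (r + 1) rest]
      simp only [hP, decide_true, if_true]
      push_cast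
      ring_nf
    · have hacc : (if P u then
          PySem.List.pySetD (pre ++ r :: rest) ((pre.length : Nat) : Int)
            (PySem.List.pyGetD (pre ++ r :: rest) ((pre.length : Nat) : Int) 0 + 1)
        else (pre ++ r :: rest)) = pre ++ r :: rest := if_neg hP
      rw [hacc, ih pre r rest]
      simp [hP]

-- the outer loop 'for inx, id in enumerate(id_list): …'
lemma pv_outer (g : String → List String) (P : String → Prop) [DecidablePred P] :
    ∀ (ids : List String) (pre rest : List Int), rest.length = ids.length →
    (PySem.List.enumerate ids (pre.length : Int)).foldl
      (fun ans p => (g p.2).foldl (fun ans u => if P u then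
          PySem.List.pySetD ans p.1 (PySem.List.pyGetD ans p.1 0 + 1)
        else ans) ans) (pre ++ rest)
    = pre ++ List.zipWith (fun (a : Int) id => a + ((g id).countP (fun u => decide (P u)) : Int)) rest ids := by
  intro ids
  induction ids with
  | nil =>
    intro pre rest h
    have : rest = [] := List.eq_nil_of_length_eq_zero h
    simp [this, PySem.List.enumerate_nil]
  | cons id ids ih =>
    intro pre rest h
    match rest, h with
    | r :: rest', h =>
      rw [PySem.List.enumerate_cons]
      simp only [List.foldl_cons]
      rw [pv_inner P (g id) pre r rest']
      have hlen : ((pre.length : Int) + 1) = (((pre ++ [r + ((g id).countP (fun u => decide (P u)) : Int)]).length : Int)) := by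
        simp
      rw [hlen]
      have : pre ++ (r + ((g id).countP (fun u => decide (P u)) : Int)) :: rest'
          = (pre ++ [r + ((g id).countP (fun u => decide (P u)) : Int)]) ++ rest' := by simp
      rw [this, ih _ rest' (by simpa using h)]
      simp

lemma pv_outer0 (g : String → List String) (P : String → Prop) [DecidablePred P]
    (ids : List String) (rest : List Int) (h : rest.length = ids.length) :
    (PySem.List.enumerate ids 0).foldl
      (fun ans p => (g p.2).foldl (fun ans u => if P u then
          PySem.List.pySetD ans p.1 (PySem.List.pyGetD ans p.1 0 + 1)
        else ans) ans) rest
    = List.zipWith (fun (a : Int) id => a + ((g id).countP (fun u => decide (P u)) : Int)) rest ids := by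
  have h0 := pv_outer g P ids [] rest h
  simpa using h0

lemma pv_zipWith_replicate (f : Int → String → Int) (l : List String) (a : Int) :
    List.zipWith f (List.replicate l.length a) l = l.map (f a) := by
  induction l with
  | nil => rfl
  | cons x xs ih => simp [List.replicate_succ, ih]

-- the dict-of-sets built by A's first loop, read back per key
lemma pv_user_getD (l : List (String × String)) :
    ∀ (d : PySem.Dict String (PySem.Set String)) (c : String),
    (l.foldl (fun d p => d.modify p.1 PySem.Set.empty (fun s => PySem.Set.add s p.2)) d).getD c PySem.Set.empty
    = PySem.Set.update (d.getD c PySem.Set.empty) ((l.filter (fun p => p.1 == c)).map (·.2)) := by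
  induction l with
  | nil => intro d c; simp [PySem.Set.update]
  | cons p l ih =>
    intro d c
    simp only [List.foldl_cons, List.filter_cons, ih]
    by_cases h : p.1 = c
    · subst h
      rw [PySem.Dict.getD_modify_self]
      simp only [beq_self_eq_true, if_true, List.map_cons]
      rfl
    · rw [PySem.Dict.getD_modify_of_ne _ _ _ (fun hc => h hc.symm)]
      simp [h]

-- B's score counter, read back per key
lemma pv_score_getD (banned : PySem.Set String) (l : List (String × String)) (c : String) :
    (l.foldl (fun (d : PySem.Dict String Int) p =>
        if PySem.Set.contains banned p.2 then d.modify p.1 0 (· + 1) else d)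
      PySem.Dict.empty).getD c 0
    = (((l.filter (fun p => PySem.Set.contains banned p.2)).map (·.1)).count c : Int) := by
  rw [PySem.List.foldl_if_eq_foldl_filter]
  rw [← List.foldl_map (f := fun p : String × String => p.1)
    (g := fun (d : PySem.Dict String Int) x => d.modify x 0 (· + 1))]
  rw [PySem.Dict.getD_foldl_modify_add_one]
  simp

-- counting over the deduplicated seconds of the pairs with first = c
-- equals counting pairs with first = c over the deduplicated pairs
lemma pv_countP_pairs (l : List (String × String)) (c : String) (P : String → Bool) :
    (PySem.Set.ofList ((l.filter (fun p => p.1 == c)).map (·.2))).countP P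
    = (PySem.Set.ofList l).countP (fun p => p.1 == c && P p.2) := by
  have hnd2 : ((PySem.Set.ofList l).filter (fun p => p.1 == c)).Nodup :=
    (PySem.Set.nodup_ofList l).filter _
  have hfst : ∀ p ∈ (PySem.Set.ofList l).filter (fun p : String × String => p.1 == c), p.1 = c := by
    intro p hp
    have := (List.mem_filter.mp hp).2
    simpa using this
  have hndmap : (((PySem.Set.ofList l).filter (fun p : String × String => p.1 == c)).map (·.2)).Nodup := by
    apply hnd2.map_on
    intro x hx y hy hxy
    have h1 := hfst x hx
    have h2 := hfst y hy
    cases x; cases y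
    simp_all
  have hmem : ∀ b, b ∈ ((PySem.Set.ofList l).filter (fun p : String × String => p.1 == c)).map (·.2)
      ↔ b ∈ PySem.Set.ofList ((l.filter (fun p => p.1 == c)).map (·.2)) := by
    intro b
    simp [List.mem_filter, PySem.Set.mem_ofList]
  have hperm : (((PySem.Set.ofList l).filter (fun p : String × String => p.1 == c)).map (·.2)).Perm
      (PySem.Set.ofList ((l.filter (fun p => p.1 == c)).map (·.2))) :=
    (List.perm_ext_iff_of_nodup hndmap (PySem.Set.nodup_ofList _)).mpr hmem
  calc (PySem.Set.ofList ((l.filter (fun p => p.1 == c)).map (·.2))).countP P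
      = (((PySem.Set.ofList l).filter (fun p : String × String => p.1 == c)).map (·.2)).countP P :=
        (hperm.countP_eq P).symm
    _ = ((PySem.Set.ofList l).filter (fun p : String × String => p.1 == c)).countP (fun p => P p.2) := by
        rw [List.countP_map]; rfl
    _ = (PySem.Set.ofList l).countP (fun p => p.1 == c && P p.2) := by
        rw [List.countP_filter]
        apply List.countP_congr
        intro p _
        constructor <;> intro h <;> simp_all

-- A's per-id count over its reported-set equals B's per-id tally over the distinct pairs
lemma pv_per_id (k : Int) (U : List String) (t0 t1 : String → String) (c : String) :
    (PySem.Set.update PySem.Set.empty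
        (((U.map (fun r => (t0 r, t1 r))).filter (fun p => p.1 == c)).map (·.2))).countP
      (fun u => decide (k ≤ (PySem.Dict.counter (U.map (fun r => t1 r))).getD u 0))
    = (((PySem.Set.ofList (U.map (fun r => (t0 r, t1 r)))).filter
        (fun p => PySem.Set.contains
          (PySem.Set.ofList ((PySem.Dict.counter (U.map (fun r => t1 r))).keys.filter
            (fun b => decide (k ≤ (PySem.Dict.counter (U.map (fun r => t1 r))).getD b 0)))) p.2)).map
        (·.1)).count c := by
  have hupd : PySem.Set.update PySem.Set.empty
      (((U.map (fun r => (t0 r, t1 r))).filter (fun p => p.1 == c)).map (·.2))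
      = PySem.Set.ofList (((U.map (fun r => (t0 r, t1 r))).filter (fun p => p.1 == c)).map (·.2)) := rfl
  rw [hupd, pv_countP_pairs]
  have hsnd : ∀ p ∈ PySem.Set.ofList (U.map (fun r => (t0 r, t1 r))), p.2 ∈ U.map (fun r => t1 r) := by
    intro p hp
    rw [PySem.Set.mem_ofList] at hp
    obtain ⟨r, hr, rfl⟩ := List.mem_map.mp hp
    exact List.mem_map_of_mem hr
  have hban : ∀ b ∈ U.map (fun r => t1 r),
      (PySem.Set.contains
        (PySem.Set.ofList ((PySem.Dict.counter (U.map (fun r => t1 r))).keys.filter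
          (fun b => decide (k ≤ (PySem.Dict.counter (U.map (fun r => t1 r))).getD b 0)))) b = true
      ↔ k ≤ (PySem.Dict.counter (U.map (fun r => t1 r))).getD b 0) := by
    intro b hb
    rw [PySem.Set.contains_iff, PySem.Set.mem_ofList, List.mem_filter]
    constructor
    · rintro ⟨-, hd⟩
      exact of_decide_eq_true hd
    · intro h
      refine ⟨?_, decide_eq_true h⟩
      rw [PySem.Dict.keys_counter, PySem.Set.mem_ofList]
      exact hb
  calc
    (PySem.Set.ofList (U.map (fun r => (t0 r, t1 r)))).countP
        (fun p => p.1 == c && decide (k ≤ (PySem.Dict.counter (U.map (fun r => t1 r))).getD p.2 0))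
      = (PySem.Set.ofList (U.map (fun r => (t0 r, t1 r)))).countP
        (fun p => p.1 == c && PySem.Set.contains
          (PySem.Set.ofList ((PySem.Dict.counter (U.map (fun r => t1 r))).keys.filter
            (fun b => decide (k ≤ (PySem.Dict.counter (U.map (fun r => t1 r))).getD b 0)))) p.2) := by
        apply List.countP_congr
        intro p hp
        simp only [Bool.and_eq_true, decide_eq_true_eq, hban p.2 (hsnd p hp)]
    _ = ((PySem.Set.ofList (U.map (fun r => (t0 r, t1 r)))).filter
          (fun p => PySem.Set.contains
            (PySem.Set.ofList ((PySem.Dict.counter (U.map (fun r => t1 r))).keys.filter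
              (fun b => decide (k ≤ (PySem.Dict.counter (U.map (fun r => t1 r))).getD b 0)))) p.2)).countP
          (fun p => p.1 == c) := (List.countP_filter ..).symm
    _ = _ := by
        rw [List.count, List.countP_map]
        rfl

-- ===== VERDICT (by name: the statement is the Claim_ definition above) =====
theorem solution_spec : Claim_equal_solution := by
  intro ids report k hdom hpre
  unfold Spec_solution
  simp only [solution, solution_alt]
  have htok : ∀ r ∈ PySem.Set.ofList report, PySem.Str.split₀ r
      = [PySem.List.pyGetD (PySem.Str.split₀ r) 0 "", PySem.List.pyGetD (PySem.Str.split₀ r) 1 ""] := by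
    intro r hr
    have := pv_tok r (hpre r (by simpa [PySem.Set.mem_ofList] using hr))
    simpa [pvT0, pvT1] using this
  have hstep_cnt : ∀ (d : PySem.Dict String Int), ∀ r ∈ PySem.Set.ofList report,
      solA_cnt d r = d.modify (PySem.List.pyGetD (PySem.Str.split₀ r) 1 "") 0 (· + 1) := by
    intro d r hr
    unfold solA_cnt
    rw [htok r hr]
    rfl
  have hstep_user : ∀ (d : PySem.Dict String (PySem.Set String)), ∀ r ∈ PySem.Set.ofList report,
      solA_user d r = d.modify (PySem.List.pyGetD (PySem.Str.split₀ r) 0 "") PySem.Set.empty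
        (fun s => PySem.Set.add s (PySem.List.pyGetD (PySem.Str.split₀ r) 1 "")) := by
    intro d r hr
    unfold solA_user
    rw [htok r hr]
    rfl
  rw [PySem.List.foldl_prod_mk solA_user solA_cnt]
  simp only
  have hcnt : List.foldl solA_cnt PySem.Dict.empty (PySem.Set.ofList report)
      = PySem.Dict.counter ((PySem.Set.ofList report).map
          (fun r => PySem.List.pyGetD (PySem.Str.split₀ r) 1 "")) := by
    rw [PySem.List.foldl_congr_mem (PySem.Set.ofList report) solA_cnt
      (fun d r => PySem.Dict.modify d (PySem.List.pyGetD (PySem.Str.split₀ r) 1 "") 0 (· + 1))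
      PySem.Dict.empty (fun acc r hr => hstep_cnt acc r hr)]
    rw [PySem.Dict.counter_eq_foldl, List.foldl_map]
  have huser : List.foldl solA_user PySem.Dict.empty (PySem.Set.ofList report)
      = List.foldl (fun d (p : String × String) =>
            PySem.Dict.modify d p.1 PySem.Set.empty (fun s => PySem.Set.add s p.2))
          PySem.Dict.empty ((PySem.Set.ofList report).map
            (fun r => (PySem.List.pyGetD (PySem.Str.split₀ r) 0 "",
                       PySem.List.pyGetD (PySem.Str.split₀ r) 1 ""))) := by
    rw [PySem.List.foldl_congr_mem (PySem.Set.ofList report) solA_user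
      (fun d r => PySem.Dict.modify d (PySem.List.pyGetD (PySem.Str.split₀ r) 0 "") PySem.Set.empty
        (fun s => PySem.Set.add s (PySem.List.pyGetD (PySem.Str.split₀ r) 1 "")))
      PySem.Dict.empty (fun acc r hr => hstep_user acc r hr)]
    rw [List.foldl_map]
  rw [hcnt, huser]
  have hA := pv_outer0
    (fun x => (List.foldl (fun d (p : String × String) =>
        PySem.Dict.modify d p.1 PySem.Set.empty (fun s => PySem.Set.add s p.2))
      PySem.Dict.empty ((PySem.Set.ofList report).map
        (fun r => (PySem.List.pyGetD (PySem.Str.split₀ r) 0 "",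
                   PySem.List.pyGetD (PySem.Str.split₀ r) 1 "")))).getD x PySem.Set.empty)
    (fun u => k ≤ (PySem.Dict.counter ((PySem.Set.ofList report).map
        (fun r => PySem.List.pyGetD (PySem.Str.split₀ r) 1 ""))).getD u 0)
    ids (List.replicate ids.length 0) (by simp)
  beta_reduce at hA
  rw [hA, pv_zipWith_replicate]
  apply List.map_congr_left
  intro c hc
  beta_reduce
  rw [pv_user_getD, PySem.Dict.getD_empty, pv_score_getD]
  rw [pv_per_id k (PySem.Set.ofList report)
    (fun r => PySem.List.pyGetD (PySem.Str.split₀ r) 0 "")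
    (fun r => PySem.List.pyGetD (PySem.Str.split₀ r) 1 "") c]
  exact zero_add _
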